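-- pv_equiv track=rewrite | github.com/cole-propach/coles-cellular-automaton | glider_search.py | pattern_to_bitmap
-- ===== SOURCE A (Python) =====
-- def pattern_to_bitmap(bits, w, h):
--     s = set()
--     i = 0
--     for y in range(h):
--         for x in range(w):
--             if bits & (1<<i):
--                 s.add((x,y))
--             i += 1
--     return s
-- ===== SOURCE B (Python) =====
-- def pattern_to_bitmap(bits, w, h):
--     s = set()
--     if w <= 0 or h <= 0:
--         return s
--     m = bits & ((1 << (w * h)) - 1)
--     while m > 0:
--         low = m & -m
--         i = low.bit_length() - 1
--         s.add((i % w, i // w))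
--         m &= m - 1
--     return s
-- ===== Notes on version B (the rewrite author's own statement) =====
-- stated objective: faster
-- what changed: B never scans grid positions at all: it masks bits to the w*h window and then extracts each set bit directly with the lowest-set-bit trick (m & -m, bit_length, m &= m-1), so it performs one iteration per SET bit (popcount) instead of one per grid cell.
import Mathlib
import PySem

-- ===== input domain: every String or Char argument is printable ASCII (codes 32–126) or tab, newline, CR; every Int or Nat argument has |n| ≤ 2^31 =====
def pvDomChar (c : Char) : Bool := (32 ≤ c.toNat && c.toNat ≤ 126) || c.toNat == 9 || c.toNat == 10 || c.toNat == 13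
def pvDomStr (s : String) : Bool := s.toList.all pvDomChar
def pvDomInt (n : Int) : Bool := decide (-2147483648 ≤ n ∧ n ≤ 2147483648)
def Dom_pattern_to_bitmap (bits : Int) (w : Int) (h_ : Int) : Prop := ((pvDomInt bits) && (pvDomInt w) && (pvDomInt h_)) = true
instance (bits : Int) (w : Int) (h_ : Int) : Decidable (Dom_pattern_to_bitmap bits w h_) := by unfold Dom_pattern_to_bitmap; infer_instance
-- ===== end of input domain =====

-- B replaces A's scan over all w*h grid cells by direct extraction of the set bits of the
-- masked pattern with the lowest-set-bit trick (m & -m, bit_length, m &= m-1), one iteration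
-- per set bit (objective: faster).

-- ===== PORT A =====
-- Python's 1 << i is ported as pvShl 1 i.toNat (left shift with Nat exponent; the counter i
-- starts at 0 and only increments, so i.toNat is exact here).
def pvShl (a : Int) (k : Nat) : Int := a <<< k

def pattern_to_bitmap (bits : Int) (w : Int) (h_ : Int) : List (Int × Int) :=
  (((PySem.List.pyRange 0 h_ 1).foldl (fun st y =>
      (PySem.List.pyRange 0 w 1).foldl (fun st x =>
        ((if PySem.Int.band bits (pvShl 1 st.2.toNat) ≠ 0 then PySem.Set.add st.1 (x, y) else st.1),
         st.2 + 1)) st)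
    ((PySem.Set.empty : PySem.Set (Int × Int)), (0 : Int))).1)

-- ===== PORT B =====
-- the 'while m > 0' loop of Source B: each iteration isolates the lowest set bit m & -m,
-- reads its index with bit_length (PySem.Int.bitLength = Python int.bit_length, exact),
-- and clears it with m &= m - 1.
def pattern_to_bitmap_alt_loop (w : Int) (m : Int) (s : PySem.Set (Int × Int)) : PySem.Set (Int × Int) :=
  if h : 0 < m then
    let low := PySem.Int.band m (-m)
    let i : Int := (PySem.Int.bitLength low : Int) - 1
    pattern_to_bitmap_alt_loop w (PySem.Int.band m (m - 1))
      (PySem.Set.add s (PySem.Int.mod i w, PySem.Int.floordiv i w))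
  else s
termination_by m.toNat
decreasing_by
  have h0 : (0:Int) ≤ m - 1 := by omega
  have hband := PySem.Int.band_of_nonneg (a := m) (b := m - 1) (by omega) h0
  rw [hband]
  have hle : m.toNat &&& (m - 1).toNat ≤ (m - 1).toNat := Nat.and_le_right
  omega

-- Python's 1 << (w*h) is ported with Nat exponent (w*h).toNat — exact since w*h > 0 in this branch.
def pattern_to_bitmap_alt (bits : Int) (w : Int) (h_ : Int) : List (Int × Int) :=
  if w ≤ 0 ∨ h_ ≤ 0 then (PySem.Set.empty : PySem.Set (Int × Int))
  else pattern_to_bitmap_alt_loop w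
         (PySem.Int.band bits (pvShl 1 (w * h_).toNat - 1)) PySem.Set.empty

-- ===== PRECONDITION & SPEC =====
def Spec_pattern_to_bitmap (bits : Int) (w : Int) (h_ : Int) (out : List (Int × Int)) : Prop := out = pattern_to_bitmap_alt bits w h_
instance (bits : Int) (w : Int) (h_ : Int) (out : List (Int × Int)) : Decidable (Spec_pattern_to_bitmap bits w h_ out) := by unfold Spec_pattern_to_bitmap; infer_instance

-- ===== CLAIM (what is proved, stated in full; the proofs are below) =====
def Claim_equal_pattern_to_bitmap : Prop := ∀ (bits : Int) (w : Int) (h_ : Int), Dom_pattern_to_bitmap bits w h_ → Spec_pattern_to_bitmap bits w h_ (pattern_to_bitmap bits w h_)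

-- ===== LEMMAS AND PROOFS =====

-- the cell a bit index k denotes
def pvPair (w k : Int) : Int × Int := (PySem.Int.mod k w, PySem.Int.floordiv k w)

-- reference list: the cells of the set bits among the given indices, in index order
def pvRefL (bits w : Int) (ks : List Nat) : List (Int × Int) :=
  ks.filterMap (fun (k : Nat) => if PySem.Int.band bits (pvShl 1 k) ≠ 0 then some (pvPair w (k : Int)) else none)

lemma pvPair_idx (w k : Int) : (pvPair w k).2 * w + (pvPair w k).1 = k := by
  simpa [pvPair] using PySem.Int.floordiv_mul_add_mod k w

-- ---- Nat bit toolbox: lowest set bit ----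

-- index of the lowest set bit (0 for n = 0, unused there)
def pvLowbit (n : Nat) : Nat :=
  if _h : n = 0 then 0
  else if n % 2 = 1 then 0
  else pvLowbit (n / 2) + 1
termination_by n
decreasing_by omega

lemma pvLowbit_testBit_self : ∀ n : Nat, 0 < n → n.testBit (pvLowbit n) = true := by
  intro n
  induction n using Nat.strong_induction_on with
  | _ n ih =>
    intro hn
    rw [pvLowbit, dif_neg (by omega)]
    by_cases hodd : n % 2 = 1
    · rw [if_pos hodd, Nat.testBit_zero]
      simpa using hodd
    · rw [if_neg hodd, Nat.testBit_add_one]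
      exact ih (n / 2) (by omega) (by omega)

lemma pvLowbit_testBit_lt : ∀ n : Nat, 0 < n → ∀ k, k < pvLowbit n → n.testBit k = false := by
  intro n
  induction n using Nat.strong_induction_on with
  | _ n ih =>
    intro hn k hk
    rw [pvLowbit, dif_neg (by omega)] at hk
    by_cases hodd : n % 2 = 1
    · rw [if_pos hodd] at hk; omega
    · rw [if_neg hodd] at hk
      cases k with
      | zero => rw [Nat.testBit_zero]; simpa using hodd
      | succ k =>
        rw [Nat.testBit_add_one]
        exact ih (n / 2) (by omega) (by omega) k (by omega)

lemma pvLowbit_even (n : Nat) (hn : 0 < n) (he : n % 2 = 0) :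
    pvLowbit n = pvLowbit (n / 2) + 1 := by
  rw [pvLowbit, dif_neg (by omega), if_neg (by omega)]

lemma pvLowbit_odd (n : Nat) (ho : n % 2 = 1) : pvLowbit n = 0 := by
  rw [pvLowbit, dif_neg (by omega), if_pos ho]

-- bits of n &&& (n-1): those of n with the lowest one cleared
lemma pvAndPred_testBit : ∀ n : Nat, 0 < n →
    ∀ k, (n &&& (n - 1)).testBit k = (decide (k ≠ pvLowbit n) && n.testBit k) := by
  intro n
  induction n using Nat.strong_induction_on with
  | _ n ih =>
    intro hn k
    rw [Nat.testBit_and]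
    by_cases hodd : n % 2 = 1
    · rw [pvLowbit_odd n hodd]
      cases k with
      | zero =>
        have h1 : (n - 1).testBit 0 = false := by rw [Nat.testBit_zero]; simp; omega
        rw [h1]
        simp
      | succ k =>
        have h1 : (n - 1).testBit (k + 1) = n.testBit (k + 1) := by
          rw [Nat.testBit_add_one, Nat.testBit_add_one]
          congr 1
          omega
        rw [h1]
        cases hb : n.testBit (k + 1) <;> simp [hb]
    · have he : n % 2 = 0 := by omega
      rw [pvLowbit_even n hn he]
      cases k with
      | zero =>
        have h0 : n.testBit 0 = false := by rw [Nat.testBit_zero]; simpa using he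
        rw [h0]
        simp
      | succ k =>
        have h1 : (n - 1).testBit (k + 1) = ((n / 2) - 1).testBit k := by
          rw [Nat.testBit_add_one]
          congr 1
          omega
        rw [h1, Nat.testBit_add_one]
        have hhalf : 0 < n / 2 := by omega
        have := ih (n / 2) (by omega) hhalf k
        rw [Nat.testBit_and] at this
        rw [this]
        have : (k + 1 ≠ pvLowbit (n / 2) + 1) ↔ (k ≠ pvLowbit (n / 2)) := by omega
        simp [this]

-- n &&& (n-1) = n - 2^(lowbit n)
lemma pvAndPred_eq : ∀ n : Nat, 0 < n → n &&& (n - 1) = n - 2 ^ (pvLowbit n) := by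
  intro n
  induction n using Nat.strong_induction_on with
  | _ n ih =>
    intro hn
    by_cases hodd : n % 2 = 1
    · rw [pvLowbit_odd n hodd, pow_zero]
      apply Nat.eq_of_testBit_eq
      intro k
      rw [Nat.testBit_and]
      cases k with
      | zero =>
        have h1 : (n - 1).testBit 0 = false := by rw [Nat.testBit_zero]; simp; omega
        rw [h1]
        simp
      | succ k =>
        have h1 : (n - 1).testBit (k + 1) = n.testBit (k + 1) := by
          rw [Nat.testBit_add_one, Nat.testBit_add_one]
          congr 1
          omega
        rw [h1, Bool.and_self]
    · have he : n % 2 = 0 := by omega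
      have hhalf : 0 < n / 2 := by omega
      have hstep : n &&& (n - 1) = 2 * ((n / 2) &&& (n / 2 - 1)) := by
        apply Nat.eq_of_testBit_eq
        intro k
        rw [Nat.testBit_and]
        cases k with
        | zero =>
          have h0 : n.testBit 0 = false := by rw [Nat.testBit_zero]; simpa using he
          have h2 : (2 * ((n / 2) &&& (n / 2 - 1))).testBit 0 = false := by
            rw [Nat.testBit_zero]; simp
          rw [h0, h2]
          simp
        | succ k =>
          have h1 : (n - 1).testBit (k + 1) = ((n / 2) - 1).testBit k := by
            rw [Nat.testBit_add_one]
            congr 1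
            omega
          have h2 : (2 * ((n / 2) &&& (n / 2 - 1))).testBit (k + 1)
              = ((n / 2) &&& (n / 2 - 1)).testBit k := by
            rw [Nat.testBit_add_one]
            congr 1
            omega
          rw [h1, h2, Nat.testBit_add_one, Nat.testBit_and]
      rw [hstep, ih (n / 2) (by omega) hhalf, pvLowbit_even n hn he]
      have hle : 2 ^ pvLowbit (n / 2) ≤ n / 2 :=
        Nat.ge_two_pow_of_testBit (pvLowbit_testBit_self (n / 2) hhalf)
      have hgen : ∀ P : Nat, P ≤ n / 2 → 2 * (n / 2 - P) = n - P * 2 := by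
        intro P h1; omega
      rw [pow_succ]
      exact hgen _ hle

lemma pvLow_eq_pow (n : Nat) (hn : 0 < n) : n - (n &&& (n - 1)) = 2 ^ (pvLowbit n) := by
  have hle : 2 ^ pvLowbit n ≤ n :=
    Nat.ge_two_pow_of_testBit (pvLowbit_testBit_self n hn)
  rw [pvAndPred_eq n hn]
  exact Nat.sub_sub_self hle

-- Python bit_length of 2^i
lemma pvBitLength_pow (i : Nat) : PySem.Int.bitLength ((2 ^ i : Nat) : Int) = i + 1 := by
  induction i with
  | zero =>
    rw [PySem.Int.bitLength_natCast (by norm_num)]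
    norm_num [PySem.Int.bitLength_zero]
  | succ i ih =>
    rw [PySem.Int.bitLength_natCast (Nat.two_pow_pos _)]
    have : 2 ^ (i + 1) / 2 = 2 ^ i := by
      rw [pow_succ]
      omega
    rw [this, ih]

-- ---- Int glue ----

lemma band_negSucc_ofNat (m n : Nat) : PySem.Int.band (Int.negSucc m) (Int.ofNat n) = Int.ofNat (n - (n &&& m)) := by
  unfold PySem.Int.band
  rw [if_neg (by omega), if_pos (by exact Int.natCast_nonneg n)]
  have h1 : -Int.negSucc m - 1 = (m : Int) := by rw [Int.negSucc_eq]; ring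
  rw [h1, Int.toNat_natCast]
  norm_num

-- m & -m for a positive m, at the Nat level
lemma band_neg_self (n : Nat) (hn : 0 < n) :
    PySem.Int.band (n : Int) (-(n : Int)) = ((n - (n &&& (n - 1)) : Nat) : Int) := by
  have hns : -(n : Int) = Int.negSucc (n - 1) := by
    rw [Int.negSucc_eq]
    push_cast [Nat.cast_sub (by omega : 1 ≤ n)]
    ring
  rw [hns, PySem.Int.band_comm, show ((n : Nat) : Int) = Int.ofNat n from rfl, band_negSucc_ofNat]
  rfl

-- ---- B: the extraction loop produces the bits list ----

-- the list B emits for a nonnegative mask n: lowest set bit first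
def pvBitsList (w : Int) (n : Nat) : List (Int × Int) :=
  if _h : n = 0 then []
  else pvPair w ((pvLowbit n : Nat) : Int) :: pvBitsList w (n &&& (n - 1))
termination_by n
decreasing_by
  have h2 := pvAndPred_eq n (by omega)
  have h3 : 0 < 2 ^ pvLowbit n := Nat.two_pow_pos _
  have hle : 2 ^ pvLowbit n ≤ n :=
    Nat.ge_two_pow_of_testBit (pvLowbit_testBit_self n (by omega))
  omega

lemma pvBitsList_zero (w : Int) : pvBitsList w 0 = [] := by
  rw [pvBitsList]
  simp

lemma pvBitsList_pos (w : Int) (n : Nat) (hn : n ≠ 0) :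
    pvBitsList w n = pvPair w ((pvLowbit n : Nat) : Int) :: pvBitsList w (n &&& (n - 1)) := by
  rw [pvBitsList, dif_neg hn]

lemma altLoop_spec (w : Int) : ∀ n : Nat, ∀ s : PySem.Set (Int × Int),
    (∀ p ∈ s, ∀ k : Nat, n.testBit k = true → p.2 * w + p.1 < (k : Int)) →
    pattern_to_bitmap_alt_loop w (n : Int) s = s ++ pvBitsList w n := by
  intro n
  induction n using Nat.strong_induction_on with
  | _ n ih =>
    intro s hs
    by_cases hn : n = 0
    · subst hn
      rw [pattern_to_bitmap_alt_loop, dif_neg (by norm_num), pvBitsList_zero]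
      simp
    · have hpos : 0 < n := by omega
      have hself := pvLowbit_testBit_self n hpos
      rw [pattern_to_bitmap_alt_loop, dif_pos (by exact_mod_cast hpos)]
      simp only []
      -- the isolated low bit and its index
      rw [band_neg_self n hpos, pvLow_eq_pow n hpos, pvBitLength_pow]
      have hidx : ((pvLowbit n + 1 : Nat) : Int) - 1 = ((pvLowbit n : Nat) : Int) := by push_cast; ring
      rw [hidx]
      -- the added pair is fresh
      have hnotmem : pvPair w ((pvLowbit n : Nat) : Int) ∉ s := by
        intro hmem
        have := hs _ hmem (pvLowbit n) hself
        rw [pvPair_idx] at this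
        omega
      have hm1 : ((n : Int) - 1) = ((n - 1 : Nat) : Int) := by push_cast [Nat.cast_sub (by omega : 1 ≤ n)]; ring
      rw [show ((PySem.Int.mod ((pvLowbit n : Nat) : Int) w, PySem.Int.floordiv ((pvLowbit n : Nat) : Int) w) : Int × Int)
            = pvPair w ((pvLowbit n : Nat) : Int) from rfl]
      rw [PySem.Set.add_of_not_mem hnotmem, hm1, PySem.Int.band_natCast]
      -- recursive call on n &&& (n-1)
      have hlt : n &&& (n - 1) < n := by
        have h2 := pvAndPred_eq n hpos
        have h3 : 0 < 2 ^ pvLowbit n := Nat.two_pow_pos _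
        have hle : 2 ^ pvLowbit n ≤ n :=
          Nat.ge_two_pow_of_testBit hself
        omega
      have hs' : ∀ p ∈ s ++ [pvPair w ((pvLowbit n : Nat) : Int)], ∀ k : Nat,
          (n &&& (n - 1)).testBit k = true → p.2 * w + p.1 < (k : Int) := by
        intro p hp k hk
        rw [pvAndPred_testBit n hpos k] at hk
        have hkne : k ≠ pvLowbit n := by
          by_contra hc
          rw [hc] at hk
          simp at hk
        have hkbit : n.testBit k = true := by
          rcases Bool.and_eq_true_iff.mp hk with ⟨-, h⟩
          exact h
        rcases List.mem_append.mp hp with h | h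
        · exact hs _ h k hkbit
        · have hpe : p = pvPair w ((pvLowbit n : Nat) : Int) := by simpa using h
          subst hpe
          rw [pvPair_idx]
          have hge : pvLowbit n < k := by
            rcases Nat.lt_or_ge k (pvLowbit n) with hlt' | hge'
            · rw [pvLowbit_testBit_lt n hpos k hlt'] at hkbit; cases hkbit
            · omega
          exact_mod_cast hge
      rw [ih (n &&& (n - 1)) hlt _ hs']
      rw [pvBitsList_pos w n hn]
      simp

-- ---- the bits list is the reference list ----

lemma bitsList_eq_ref (bits w : Int) : ∀ n : Nat, ∀ j N : Nat,
    (∀ k, n.testBit k = true → j ≤ k ∧ k < N) →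
    (∀ k, j ≤ k → k < N → (n.testBit k = true ↔ PySem.Int.band bits (pvShl 1 k) ≠ 0)) →
    pvBitsList w n = pvRefL bits w (List.range' j (N - j)) := by
  intro n
  induction n using Nat.strong_induction_on with
  | _ n ih =>
    intro j N h1 h2
    by_cases hn : n = 0
    · subst hn
      rw [pvBitsList_zero]
      unfold pvRefL
      symm
      rw [List.filterMap_eq_nil_iff]
      intro k hk
      obtain ⟨hjk, hkN⟩ := List.mem_range'_1.mp hk
      rw [if_neg]
      rw [← h2 k hjk (by omega)]
      simp
    · have hpos : 0 < n := by omega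
      set i := pvLowbit n with hi
      have hself := pvLowbit_testBit_self n hpos
      obtain ⟨hji, hiN⟩ := h1 i hself
      -- splice the range at i
      have hsplit : List.range' j (N - j) = List.range' j (i - j) ++ i :: List.range' (i + 1) (N - (i + 1)) := by
        rw [show (i : Nat) :: List.range' (i + 1) (N - (i + 1)) = List.range' i (N - i) by
          rw [show N - i = (N - (i + 1)) + 1 by omega, List.range'_succ]]
        rw [show List.range' i (N - i) = List.range' (j + (i - j)) (N - i) by congr 1; omega]
        rw [List.range'_append_1]
        congr 1
        omega
      rw [hsplit]
      unfold pvRefL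
      rw [List.filterMap_append]
      have hlo : (List.range' j (i - j)).filterMap
          (fun (k : Nat) => if PySem.Int.band bits (pvShl 1 k) ≠ 0 then some (pvPair w (k : Int)) else none) = [] := by
        rw [List.filterMap_eq_nil_iff]
        intro k hk
        obtain ⟨hjk, hki⟩ := List.mem_range'_1.mp hk
        rw [if_neg]
        rw [← h2 k hjk (by omega)]
        rw [pvLowbit_testBit_lt n hpos k (by omega)]
        simp
      rw [hlo, List.nil_append, List.filterMap_cons]
      have hhead : PySem.Int.band bits (pvShl 1 i) ≠ 0 := (h2 i hji hiN).mp hself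
      rw [if_pos hhead]
      rw [pvBitsList_pos w n hn]
      congr 1
      have hlt : n &&& (n - 1) < n := by
        have h2' := pvAndPred_eq n hpos
        have h3 : 0 < 2 ^ pvLowbit n := Nat.two_pow_pos _
        have hle : 2 ^ pvLowbit n ≤ n := Nat.ge_two_pow_of_testBit hself
        omega
      have h1' : ∀ k, (n &&& (n - 1)).testBit k = true → i + 1 ≤ k ∧ k < N := by
        intro k hk
        rw [pvAndPred_testBit n hpos k] at hk
        obtain ⟨hne, hbit⟩ := Bool.and_eq_true_iff.mp hk
        have hkne : k ≠ i := by simpa using hne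
        have hge : i < k := by
          rcases Nat.lt_or_ge k i with hlt' | hge'
          · rw [pvLowbit_testBit_lt n hpos k hlt'] at hbit; cases hbit
          · omega
        exact ⟨by omega, (h1 k hbit).2⟩
      have h2' : ∀ k, i + 1 ≤ k → k < N → ((n &&& (n - 1)).testBit k = true ↔ PySem.Int.band bits (pvShl 1 k) ≠ 0) := by
        intro k hjk hkN
        rw [pvAndPred_testBit n hpos k]
        have : (decide (k ≠ i) : Bool) = true := by simp; omega
        rw [this, Bool.true_and]
        exact h2 k (by omega) hkN
      have := ih (n &&& (n - 1)) hlt (i + 1) N h1' h2'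
      rw [this]
      rfl

-- ---- the masked pattern reads the same bits as A's test ----

-- (c - (c &&& b)): bits of c not in b (the masking identity behind bits & mask for negative bits)
lemma sub_and_testBit : ∀ c : Nat, ∀ b k : Nat,
    (c - (c &&& b)).testBit k = (c.testBit k && !(b.testBit k)) := by
  intro c
  induction c using Nat.strong_induction_on with
  | _ c ih =>
    intro b k
    by_cases hc : c = 0
    · subst hc; simp
    · have hdecomp : c &&& b = 2 * ((c / 2) &&& (b / 2)) + ((c % 2) &&& (b % 2)) := by
        apply Nat.eq_of_testBit_eq
        intro t
        have hsmall : (c % 2) &&& (b % 2) ≤ 1 := le_trans Nat.and_le_left (by omega)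
        cases t with
        | zero =>
          rw [Nat.testBit_and, Nat.testBit_zero, Nat.testBit_zero, Nat.testBit_zero]
          rcases Nat.mod_two_eq_zero_or_one c with h1 | h1 <;>
            rcases Nat.mod_two_eq_zero_or_one b with h2 | h2 <;>
            simp [h1, h2] <;> omega
        | succ t =>
          have hdiv2 : (2 * ((c / 2) &&& (b / 2)) + ((c % 2) &&& (b % 2))) / 2
              = (c / 2) &&& (b / 2) := by omega
          rw [Nat.testBit_and, Nat.testBit_add_one c t, Nat.testBit_add_one b t,
            Nat.testBit_add_one, hdiv2, Nat.testBit_and]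
      have hle1 : (c / 2) &&& (b / 2) ≤ c / 2 := Nat.and_le_left
      have hle2 : (c % 2) &&& (b % 2) ≤ c % 2 := Nat.and_le_left
      have harith : c - (c &&& b) = 2 * (c / 2 - ((c / 2) &&& (b / 2))) + (c % 2 - ((c % 2) &&& (b % 2))) := by
        rw [hdecomp]
        omega
      rw [harith]
      cases k with
      | zero =>
        rw [Nat.testBit_zero, Nat.testBit_zero, Nat.testBit_zero]
        rcases Nat.mod_two_eq_zero_or_one c with h1 | h1 <;>
          rcases Nat.mod_two_eq_zero_or_one b with h2 | h2 <;>
          simp [h1, h2] <;> omega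
      | succ k =>
        rw [Nat.testBit_add_one, Nat.testBit_add_one, Nat.testBit_add_one]
        have hdiv : (2 * (c / 2 - ((c / 2) &&& (b / 2))) + (c % 2 - ((c % 2) &&& (b % 2)))) / 2
            = c / 2 - ((c / 2) &&& (b / 2)) := by omega
        rw [hdiv]
        exact ih (c / 2) (by omega) (b / 2) k

-- A's bit test, at the Nat level, for nonnegative bits
lemma bandA_pos (a k : Nat) :
    (PySem.Int.band ((a : Nat) : Int) (pvShl 1 k) ≠ 0) ↔ a.testBit k = true := by
  have hsh : pvShl 1 k = ((2 ^ k : Nat) : Int) := by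
    unfold pvShl
    rw [show ((1:Int) <<< k) = ((1 <<< k : Nat) : Int) from rfl]
    norm_num [Nat.one_shiftLeft]
  rw [hsh, PySem.Int.band_natCast, Nat.and_two_pow]
  cases h : a.testBit k <;> simp [h]

-- A's bit test for negative bits: bit k of negSucc b is the complement of bit k of b
lemma bandA_neg (b k : Nat) :
    (PySem.Int.band (Int.negSucc b) (pvShl 1 k) ≠ 0) ↔ b.testBit k = false := by
  have hsh : pvShl 1 k = Int.ofNat (2 ^ k) := by
    unfold pvShl
    rw [show ((1:Int) <<< k) = ((1 <<< k : Nat) : Int) from rfl]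
    norm_num [Nat.one_shiftLeft]
  rw [hsh, band_negSucc_ofNat]
  rw [Nat.and_comm, Nat.and_two_pow]
  have hp : 0 < 2 ^ k := Nat.two_pow_pos _
  cases h : b.testBit k <;> simp [h] <;> omega

-- the masked pattern m = bits & (2^N - 1) is a Nat whose bits are exactly A's tests below N
lemma mask_spec (bits : Int) (N : Nat) :
    ∃ n0 : Nat, PySem.Int.band bits (pvShl 1 N - 1) = (n0 : Int) ∧
      ∀ k, (n0.testBit k = true ↔ (k < N ∧ PySem.Int.band bits (pvShl 1 k) ≠ 0)) := by
  have hmask : pvShl 1 N - 1 = ((2 ^ N - 1 : Nat) : Int) := by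
    unfold pvShl
    rw [show ((1:Int) <<< N) = ((1 <<< N : Nat) : Int) from rfl]
    push_cast [Nat.one_shiftLeft, Nat.cast_sub (Nat.one_le_two_pow)]
    ring
  rw [hmask]
  cases bits with
  | ofNat a =>
    refine ⟨a &&& (2 ^ N - 1), ?_, ?_⟩
    · rw [show (Int.ofNat a) = ((a : Nat) : Int) from rfl, PySem.Int.band_natCast]
    · intro k
      rw [Nat.testBit_and, Nat.testBit_two_pow_sub_one]
      rw [show (Int.ofNat a) = ((a : Nat) : Int) from rfl, bandA_pos]
      cases h : a.testBit k <;> simp [h] <;> omega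
  | negSucc b =>
    refine ⟨(2 ^ N - 1) - ((2 ^ N - 1) &&& b), ?_, ?_⟩
    · rw [show ((2 ^ N - 1 : Nat) : Int) = Int.ofNat (2 ^ N - 1) from rfl, band_negSucc_ofNat]
      rfl
    · intro k
      rw [sub_and_testBit, Nat.testBit_two_pow_sub_one, bandA_neg]
      cases h : b.testBit k <;> simp [h] <;> omega

-- ===== A: the grid scan produces the reference list =====
-- the pair A adds at grid position (x, y) is the cell of index y*w + x
lemma pair_eq_pvPair (w x y : Int) (hw : 0 < w) (hx0 : 0 ≤ x) (hxw : x < w) :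
    ((x, y) : Int × Int) = pvPair w (y * w + x) := by
  have hmod : PySem.Int.mod (y * w + x) w = x := by
    rw [PySem.Int.mod_eq_emod_of_pos hw]
    rw [Int.add_comm, Int.mul_comm y w, Int.add_mul_emod_self_left]
    exact Int.emod_eq_of_lt hx0 hxw
  have hdiv : PySem.Int.floordiv (y * w + x) w = y := by
    rw [PySem.Int.floordiv_eq_iff_of_pos hw]
    constructor <;> nlinarith
  simp [pvPair, hmod, hdiv]

lemma inner_spec (bits w : Int) (y : Int) (hw : 0 < w) (hy : 0 ≤ y) :
    ∀ (u a : Nat), a + u ≤ w.toNat →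
      ∀ (s : PySem.Set (Int × Int)) (i : Int), i = y * w + (a : Int) →
        (∀ p ∈ s, p.2 * w + p.1 < i) →
        ((List.range' a u).map (fun k => ((k : Nat) : Int))).foldl
            (fun st x =>
              ((if PySem.Int.band bits (pvShl 1 st.2.toNat) ≠ 0 then PySem.Set.add st.1 (x, y) else st.1),
               st.2 + 1)) (s, i)
          = (s ++ pvRefL bits w (List.range' i.toNat u), i + (u : Int)) := by
  intro u
  induction u with
  | zero => intro a _ s i _ _; simp [pvRefL]
  | succ u ih =>
    intro a hau s i hi hfresh
    have hi0 : 0 ≤ i := by rw [hi]; have hmn := mul_nonneg hy hw.le; omega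
    have hiN : (i.toNat : Int) = i := Int.toNat_of_nonneg hi0
    rw [List.range'_succ, List.map_cons, List.foldl_cons]
    dsimp only
    have haw : (a : Int) < w := by omega
    have hpair : (((a : Int), y) : Int × Int) = pvPair w i := by
      rw [hi]; exact pair_eq_pvPair w (a : Int) y hw (by positivity) haw
    have hnotmem : pvPair w i ∉ s := by
      intro hmem
      have hlt := hfresh _ hmem
      rw [pvPair_idx] at hlt
      omega
    set s' := (if PySem.Int.band bits (pvShl 1 i.toNat) ≠ 0 then PySem.Set.add s ((a : Int), y) else s) with hs'
    have hfresh' : ∀ p ∈ s', p.2 * w + p.1 < i + 1 := by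
      intro p hp
      rw [hs'] at hp
      split at hp
      · rcases (PySem.Set.mem_add _ _ _).mp hp with h | h
        · have := hfresh _ h; omega
        · subst h
          rw [hpair, pvPair_idx]
          omega
      · have := hfresh _ hp; omega
    have hrec := ih (a + 1) (by omega) s' (i + 1) (by rw [hi]; push_cast; ring) hfresh'
    have hit : (i + 1).toNat = i.toNat + 1 := by omega
    rw [hit] at hrec
    rw [hrec]
    rw [List.range'_succ]
    simp only [pvRefL, List.filterMap_cons, Prod.mk.injEq]
    constructor
    · by_cases hc : PySem.Int.band bits (pvShl 1 i.toNat) ≠ 0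
      · rw [hs', if_pos hc, hpair, PySem.Set.add_of_not_mem hnotmem]
        rw [if_pos hc]
        simp [hiN]
      · rw [hs', if_neg hc]
        rw [if_neg hc]
    · push_cast; ring

lemma outer_spec (bits w : Int) (hw : 0 < w) :
    ∀ (v b : Nat),
      ∀ (s : PySem.Set (Int × Int)) (i : Int), i = (b : Int) * w →
        (∀ p ∈ s, p.2 * w + p.1 < i) →
        ((List.range' b v).map (fun k => ((k : Nat) : Int))).foldl
            (fun st y =>
              (((List.range' 0 w.toNat).map (fun k => ((k : Nat) : Int))).foldl
                (fun st x =>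
                  ((if PySem.Int.band bits (pvShl 1 st.2.toNat) ≠ 0 then PySem.Set.add st.1 (x, y) else st.1),
                   st.2 + 1)) st)) (s, i)
          = (s ++ pvRefL bits w (List.range' i.toNat (v * w.toNat)), i + (v : Int) * w) := by
  intro v
  induction v with
  | zero => intro b s i _ _; simp [pvRefL]
  | succ v ih =>
    intro b s i hi hfresh
    have hb0 : (0 : Int) ≤ (b : Int) := by positivity
    have hi0 : 0 ≤ i := by rw [hi]; have hmn := mul_nonneg hb0 hw.le; omega
    have hiN : (i.toNat : Int) = i := Int.toNat_of_nonneg hi0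
    rw [List.range'_succ, List.map_cons, List.foldl_cons]
    have hinner := inner_spec bits w ((b : Nat) : Int) hw hb0 w.toNat 0 (by omega) s i
      (by rw [hi]; push_cast; ring) hfresh
    rw [hinner]
    have hfresh2 : ∀ p ∈ s ++ pvRefL bits w (List.range' i.toNat w.toNat), p.2 * w + p.1 < i + (w.toNat : Int) := by
      intro p hp
      rcases List.mem_append.mp hp with h | h
      · have := hfresh _ h; omega
      · simp only [pvRefL, List.mem_filterMap] at h
        obtain ⟨k, hk, hke⟩ := h
        obtain ⟨hk1, hk2⟩ := List.mem_range'_1.mp hk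
        split at hke
        · cases hke
          rw [pvPair_idx]
          omega
        · cases hke
    have hrec := ih (b + 1) (s ++ pvRefL bits w (List.range' i.toNat w.toNat)) (i + (w.toNat : Int))
      (by rw [hi]; push_cast; rw [Int.toNat_of_nonneg (le_of_lt hw)]; ring) hfresh2
    rw [hrec]
    have hit : (i + (w.toNat : Int)).toNat = i.toNat + w.toNat := by omega
    rw [hit]
    simp only [Prod.mk.injEq]
    constructor
    · rw [List.append_assoc]
      congr 1
      rw [show (v + 1) * w.toNat = w.toNat + v * w.toNat by ring]
      rw [← List.range'_append_1]
      simp [pvRefL]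
    · push_cast
      rw [Int.toNat_of_nonneg (le_of_lt hw)]
      ring

-- ===== VERDICT (by name: the statement is the Claim_ definition above) =====
theorem pattern_to_bitmap_spec : Claim_equal_pattern_to_bitmap := by
  intro bits w h_ _
  unfold Spec_pattern_to_bitmap pattern_to_bitmap pattern_to_bitmap_alt
  by_cases hdeg : w ≤ 0 ∨ h_ ≤ 0
  · rw [if_pos hdeg]
    rcases hdeg with hw | hh
    · have hwr : PySem.List.pyRange 0 w 1 = [] := by
        rw [PySem.List.pyRange_one]
        have h0 : (w - 0).toNat = 0 := by omega
        rw [h0]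
        simp
      have hfix : ∀ (ys : List Int) (st : PySem.Set (Int × Int) × Int),
          ys.foldl (fun st (_ : Int) => st) st = st := by
        intro ys
        induction ys with
        | nil => intro st; rfl
        | cons y ys ihy => intro st; rw [List.foldl_cons]; exact ihy st
      rw [hwr]
      simp only [List.foldl_nil]
      rw [hfix]
    · have hhr : PySem.List.pyRange 0 h_ 1 = [] := by
        rw [PySem.List.pyRange_one]
        have h0 : (h_ - 0).toNat = 0 := by omega
        rw [h0]
        simp
      rw [hhr]
      rfl
  · rw [if_neg hdeg]
    rw [not_or, not_le, not_le] at hdeg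
    obtain ⟨hw, hh⟩ := hdeg
    -- A's side: the double scan builds the reference list over all indices below N
    have hrw : ∀ c : Int, PySem.List.pyRange 0 c 1 = (List.range' 0 c.toNat).map (fun k => ((k : Nat) : Int)) := by
      intro c
      rw [PySem.List.pyRange_one]
      simp only [zero_add, sub_zero, List.range_eq_range']
    rw [hrw w, hrw h_]
    have hA := outer_spec bits w hw h_.toNat 0 PySem.Set.empty 0 (by simp)
      (by intro p hp; simp [PySem.Set.empty] at hp)
    rw [hA]
    -- B's side: mask, then extract the set bits
    set N := (w * h_).toNat with hN
    obtain ⟨n0, hm0, hchar⟩ := mask_spec bits N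
    rw [hm0]
    have hB := altLoop_spec w n0 PySem.Set.empty
      (by intro p hp; simp [PySem.Set.empty] at hp)
    rw [hB]
    have hBr := bitsList_eq_ref bits w n0 0 N
      (fun k hk => ⟨Nat.zero_le k, ((hchar k).mp hk).1⟩)
      (fun k _ hkN => by
        rw [hchar k]
        constructor
        · exact fun h => h.2
        · exact fun h => ⟨hkN, h⟩)
    rw [hBr]
    norm_num
    have hmul : N = h_.toNat * w.toNat := by
      rw [hN, Int.toNat_mul (le_of_lt hw) (le_of_lt hh), Nat.mul_comm]
    rw [hmul]
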